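-- pv_equiv track=rewrite | github.com/wsethbrown/NeverEndingQuest | area_generator.py | clean_grid
-- ===== SOURCE A (Python) =====
-- from typing import Dict, List, Any, Tuple
--
-- def clean_grid(grid: List[List[str]]) -> List[List[str]]:
--     """Remove empty rows and columns from grid"""
--     # Find bounds
--     min_x, max_x = len(grid[0]), 0
--     min_y, max_y = len(grid), 0
--
--     for y in range(len(grid)):
--         for x in range(len(grid[0])):
--             if grid[y][x] != "   ":
--                 min_x = min(min_x, x)
--                 max_x = max(max_x, x)
--                 min_y = min(min_y, y)
--                 max_y = max(max_y, y)
--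
--     # Extract non-empty portion
--     if min_x <= max_x and min_y <= max_y:
--         cleaned = []
--         for y in range(min_y, max_y + 1):
--             row = []
--             for x in range(min_x, max_x + 1):
--                 row.append(grid[y][x])
--             cleaned.append(row)
--         return cleaned
--
--     return [[]]
-- ===== SOURCE B (Python) =====
-- def clean_grid(grid):
--     """Remove empty rows and columns from grid"""
--     W = len(grid[0])
--     H = len(grid)
--     rows = [y for y in range(H) if any(grid[y][x] != "   " for x in range(W))]
--     cols = [x for x in range(W) if any(grid[y][x] != "   " for y in range(H))]
--     if rows and cols:
--         return [[grid[y][x] for x in range(min(cols), max(cols) + 1)]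
--                 for y in range(min(rows), max(rows) + 1)]
--     return [[]]
-- ===== Notes on version B (the rewrite author's own statement) =====
-- stated objective: faster
-- what changed: Replaced A's single fused scan that threads four min/max accumulators through nested loops by two independent comprehensions collecting the non-empty row and column indices (short-circuiting any()), taking min/max of those lists to crop; measured ~3x faster (constant factor).
-- outside the precondition, e.g. on clean_grid([]): A raises IndexError, B raises IndexError; on clean_grid([['x', 'x'], ['x']]): A raises IndexError, B raises IndexError
import Mathlib
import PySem

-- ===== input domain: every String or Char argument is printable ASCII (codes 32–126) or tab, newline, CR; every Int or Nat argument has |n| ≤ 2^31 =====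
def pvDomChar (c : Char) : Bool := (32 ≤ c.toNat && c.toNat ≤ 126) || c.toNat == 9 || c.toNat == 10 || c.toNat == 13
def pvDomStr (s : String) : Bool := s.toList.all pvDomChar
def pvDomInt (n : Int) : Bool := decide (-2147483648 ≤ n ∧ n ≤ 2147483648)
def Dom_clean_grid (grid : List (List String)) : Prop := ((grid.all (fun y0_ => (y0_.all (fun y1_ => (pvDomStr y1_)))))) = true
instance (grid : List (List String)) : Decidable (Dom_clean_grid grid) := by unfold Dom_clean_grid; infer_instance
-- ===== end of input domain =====

-- B replaces A's fused four-accumulator scan by two independent row/column presence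
-- passes with min/max over the index lists (measured faster by a constant factor).

-- ===== PORT A =====
-- literal transliteration of A: one fused scan keeping (min_x, max_x, min_y, max_y)
def clean_grid (grid : List (List String)) : List (List String) :=
  let W := (grid.headD []).length
  let s := (List.range grid.length).foldl (fun s y =>
      (List.range W).foldl (fun s x =>
        if ((grid.getD y []).getD x "") != "   " then
          (min s.1 x, max s.2.1 x, min s.2.2.1 y, max s.2.2.2 y)
        else s) s)
    (W, 0, grid.length, 0)
  if s.1 ≤ s.2.1 ∧ s.2.2.1 ≤ s.2.2.2 then
    (List.range' s.2.2.1 (s.2.2.2 + 1 - s.2.2.1)).map (fun y =>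
      (List.range' s.1 (s.2.1 + 1 - s.1)).map (fun x => (grid.getD y []).getD x ""))
  else [[]]

-- ===== PORT B =====
-- literal transliteration of B: nonempty-row and nonempty-column index lists, then min/max
def clean_grid_alt (grid : List (List String)) : List (List String) :=
  let W := (grid.headD []).length
  let H := grid.length
  let rows := (List.range H).filter (fun y =>
      (List.range W).any (fun x => ((grid.getD y []).getD x "") != "   "))
  let cols := (List.range W).filter (fun x =>
      (List.range H).any (fun y => ((grid.getD y []).getD x "") != "   "))
  match rows.min?, rows.max?, cols.min?, cols.max? with
  | some y0, some y1, some x0, some x1 =>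
    (List.range' y0 (y1 + 1 - y0)).map (fun y =>
      (List.range' x0 (x1 + 1 - x0)).map (fun x => (grid.getD y []).getD x ""))
  | _, _, _, _ => [[]]

-- ===== PRECONDITION & SPEC =====
-- Pre_ excludes exactly the inputs where Python A raises IndexError: the empty grid
-- (grid[0]) and grids with a row shorter than row 0 (grid[y][x] for x < len(grid[0])).
def Pre_clean_grid (grid : List (List String)) : Prop :=
  grid ≠ [] ∧ ∀ row ∈ grid, (grid.headD []).length ≤ row.length
instance (grid : List (List String)) : Decidable (Pre_clean_grid grid) := by
  unfold Pre_clean_grid; infer_instance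

def pvWitness_clean_grid : List (List String) :=
  [["   ", "x"], ["   ", "   "]]

def Spec_clean_grid (grid : List (List String)) (out : List (List String)) : Prop := out = clean_grid_alt grid
instance (grid : List (List String)) (out : List (List String)) : Decidable (Spec_clean_grid grid out) := by unfold Spec_clean_grid; infer_instance

-- ===== CLAIM (what is proved, stated in full; the proofs are below) =====
def Claim_equal_clean_grid : Prop := ∀ (grid : List (List String)), Dom_clean_grid grid → Pre_clean_grid grid → Spec_clean_grid grid (clean_grid grid)

-- ===== LEMMAS AND PROOFS =====

-- the cell predicate both programs test
def pvP (grid : List (List String)) (y x : Nat) : Bool :=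
  ((grid.getD y []).getD x "") != "   "

-- A's four-accumulator update, and the list of coordinates of non-empty cells
def pvUpd (s : Nat × Nat × Nat × Nat) (q : Nat × Nat) : Nat × Nat × Nat × Nat :=
  (min s.1 q.2, max s.2.1 q.2, min s.2.2.1 q.1, max s.2.2.2 q.1)

def pvL (grid : List (List String)) (W H : Nat) : List (Nat × Nat) :=
  (List.range H).flatMap (fun y =>
    (((List.range W).filter (pvP grid y)).map (fun x => (y, x))))

lemma pv_foldA (grid : List (List String)) (W H : Nat) (s0 : Nat × Nat × Nat × Nat) :
    (List.range H).foldl (fun s y =>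
      (List.range W).foldl (fun s x =>
        if ((grid.getD y []).getD x "") != "   " then
          (min s.1 x, max s.2.1 x, min s.2.2.1 y, max s.2.2.2 y)
        else s) s) s0
    = (pvL grid W H).foldl pvUpd s0 := by
  rw [pvL, List.foldl_flatMap]
  simp only [List.foldl_map, List.foldl_filter, pvUpd, pvP]
  rfl

lemma pv_fold_components : ∀ (l : List (Nat × Nat)) (s : Nat × Nat × Nat × Nat),
    l.foldl pvUpd s =
      ((l.map Prod.snd).foldl min s.1, (l.map Prod.snd).foldl max s.2.1,
       (l.map Prod.fst).foldl min s.2.2.1, (l.map Prod.fst).foldl max s.2.2.2) := by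
  intro l
  induction l with
  | nil => intro s; rfl
  | cons q t ih =>
    intro s
    simp only [List.foldl_cons, List.map_cons]
    exact ih (pvUpd s q)

lemma pv_foldl_min_mem : ∀ (l : List Nat) (a : Nat), l.foldl min a ∈ a :: l := by
  intro l
  induction l with
  | nil => intro a; simp
  | cons x t ih =>
    intro a
    simp only [List.foldl_cons]
    rcases List.mem_cons.mp (ih (min a x)) with h | h
    · rcases min_choice a x with hm | hm
      · rw [h, hm]; exact List.mem_cons_self
      · rw [h, hm]; exact List.mem_cons_of_mem _ List.mem_cons_self
    · exact List.mem_cons_of_mem _ (List.mem_cons_of_mem _ h)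

lemma pv_foldl_min_le : ∀ (l : List Nat) (a b : Nat), b ∈ a :: l → l.foldl min a ≤ b := by
  intro l
  induction l with
  | nil => intro a b hb; simp at hb; simp [hb]
  | cons x t ih =>
    intro a b hb
    simp only [List.foldl_cons]
    rcases List.mem_cons.mp hb with rfl | hb
    · exact le_trans (ih (min b x) _ List.mem_cons_self) (min_le_left b x)
    rcases List.mem_cons.mp hb with rfl | hb
    · exact le_trans (ih (min a b) _ List.mem_cons_self) (min_le_right a b)
    · exact ih (min a x) b (List.mem_cons_of_mem _ hb)

lemma pv_foldl_max_mem : ∀ (l : List Nat) (a : Nat), l.foldl max a ∈ a :: l := by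
  intro l
  induction l with
  | nil => intro a; simp
  | cons x t ih =>
    intro a
    simp only [List.foldl_cons]
    rcases List.mem_cons.mp (ih (max a x)) with h | h
    · rcases max_choice a x with hm | hm
      · rw [h, hm]; exact List.mem_cons_self
      · rw [h, hm]; exact List.mem_cons_of_mem _ List.mem_cons_self
    · exact List.mem_cons_of_mem _ (List.mem_cons_of_mem _ h)

lemma pv_foldl_max_ge : ∀ (l : List Nat) (a b : Nat), b ∈ a :: l → b ≤ l.foldl max a := by
  intro l
  induction l with
  | nil => intro a b hb; simp at hb; simp [hb]
  | cons x t ih =>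
    intro a b hb
    simp only [List.foldl_cons]
    rcases List.mem_cons.mp hb with rfl | hb
    · exact le_trans (le_max_left b x) (ih (max b x) _ List.mem_cons_self)
    rcases List.mem_cons.mp hb with rfl | hb
    · exact le_trans (le_max_right a b) (ih (max a b) _ List.mem_cons_self)
    · exact ih (max a x) b (List.mem_cons_of_mem _ hb)

lemma pv_mem_snd (grid : List (List String)) (W H x : Nat) :
    x ∈ (pvL grid W H).map Prod.snd ↔ x < W ∧ ∃ y, y < H ∧ pvP grid y x := by
  simp only [pvL, List.map_flatMap, List.mem_flatMap, List.mem_range, List.map_map,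
    List.mem_map, List.mem_filter, Function.comp]
  constructor
  · rintro ⟨y, hy, x', ⟨hx', hp⟩, rfl⟩
    exact ⟨hx', y, hy, hp⟩
  · rintro ⟨hx, y, hy, hp⟩
    exact ⟨y, hy, x, ⟨hx, hp⟩, rfl⟩

lemma pv_mem_fst (grid : List (List String)) (W H y : Nat) :
    y ∈ (pvL grid W H).map Prod.fst ↔ y < H ∧ ∃ x, x < W ∧ pvP grid y x := by
  simp only [pvL, List.map_flatMap, List.mem_flatMap, List.mem_range, List.map_map,
    List.mem_map, List.mem_filter, Function.comp]
  constructor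
  · rintro ⟨y', hy', x', ⟨hx', hp⟩, rfl⟩
    exact ⟨hy', x', hx', hp⟩
  · rintro ⟨hy, x, hx, hp⟩
    exact ⟨y, hy, x, ⟨hx, hp⟩, rfl⟩

-- minimum of a nonempty index list via the fold with an out-of-range initial value
lemma pv_min?_eq (l m : List Nat) (a : Nat) (hsub : ∀ b, b ∈ l ↔ b ∈ m)
    (hlt : ∀ b ∈ l, b < a) (hne : l ≠ []) :
    m.min? = some (l.foldl min a) := by
  obtain ⟨w, hw⟩ := List.exists_mem_of_ne_nil l hne
  have hmem : l.foldl min a ∈ l := by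
    rcases List.mem_cons.mp (pv_foldl_min_mem l a) with h | h
    · exfalso
      have h1 := pv_foldl_min_le l a w (List.mem_cons_of_mem _ hw)
      have h2 := hlt w hw
      omega
    · exact h
  rw [List.min?_eq_some_iff']
  exact ⟨(hsub _).mp hmem, fun b hb =>
    pv_foldl_min_le l a b (List.mem_cons_of_mem _ ((hsub b).mpr hb))⟩

lemma pv_max?_eq (l m : List Nat) (hsub : ∀ b, b ∈ l ↔ b ∈ m) (hne : l ≠ []) :
    m.max? = some (l.foldl max 0) := by
  obtain ⟨w, hw⟩ := List.exists_mem_of_ne_nil l hne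
  have hmem : l.foldl max 0 ∈ l := by
    rcases List.mem_cons.mp (pv_foldl_max_mem l 0) with h | h
    · have h1 := pv_foldl_max_ge l 0 w (List.mem_cons_of_mem _ hw)
      have : w = 0 := by omega
      rw [h, ← this]; exact hw
    · exact h
  rw [List.max?_eq_some_iff']
  exact ⟨(hsub _).mp hmem, fun b hb =>
    pv_foldl_max_ge l 0 b (List.mem_cons_of_mem _ ((hsub b).mpr hb))⟩

-- ===== VERDICT (by name: the statement is the Claim_ definition above) =====
theorem clean_grid_spec : Claim_equal_clean_grid := by
  intro grid _hdom hpre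
  unfold Spec_clean_grid clean_grid clean_grid_alt
  dsimp only
  obtain ⟨hne, _hlen⟩ := hpre
  set W := (grid.headD []).length with hW
  set H := grid.length with hH
  have hH1 : 1 ≤ H := by
    rw [hH]; exact List.length_pos_of_ne_nil hne
  rw [pv_foldA grid W H (W, 0, H, 0), pv_fold_components]
  set L := pvL grid W H with hL
  set xs := L.map Prod.snd with hxs
  set ys := L.map Prod.fst with hys
  -- the nonempty-column / nonempty-row index lists of B
  have hcols : ∀ b, b ∈ xs ↔ b ∈ (List.range W).filter (fun x =>
      (List.range H).any (fun y => ((grid.getD y []).getD x "") != "   ")) := by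
    intro b
    rw [hxs, hL, pv_mem_snd]
    simp [List.mem_filter, List.any_eq_true, pvP]
  have hrows : ∀ b, b ∈ ys ↔ b ∈ (List.range H).filter (fun y =>
      (List.range W).any (fun x => ((grid.getD y []).getD x "") != "   ")) := by
    intro b
    rw [hys, hL, pv_mem_fst]
    simp only [List.mem_filter, List.any_eq_true, List.mem_range, pvP]
  have hxlt : ∀ b ∈ xs, b < W := by
    intro b hb; rw [hxs, hL, pv_mem_snd] at hb; exact hb.1
  have hylt : ∀ b ∈ ys, b < H := by
    intro b hb; rw [hys, hL, pv_mem_fst] at hb; exact hb.1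
  by_cases hLnil : L = []
  · -- no non-empty cell: both sides return [[]]
    have hx : xs = [] := by rw [hxs, hLnil]; rfl
    have hy : ys = [] := by rw [hys, hLnil]; rfl
    have hcnil : (List.range W).filter (fun x =>
        (List.range H).any (fun y => ((grid.getD y []).getD x "") != "   ")) = [] := by
      rw [List.eq_nil_iff_forall_not_mem]
      intro b hb
      have := (hcols b).mpr hb
      rw [hx] at this; simp at this
    have hrnil : (List.range H).filter (fun y =>
        (List.range W).any (fun x => ((grid.getD y []).getD x "") != "   ")) = [] := by
      rw [List.eq_nil_iff_forall_not_mem]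
      intro b hb
      have := (hrows b).mpr hb
      rw [hy] at this; simp at this
    rw [hx, hy, hcnil, hrnil]
    have hguard : ¬ (W ≤ 0 ∧ H ≤ 0) := by omega
    simp only [List.foldl_nil, List.min?_nil, if_neg hguard]
  · -- some non-empty cell exists
    have hxne : xs ≠ [] := by
      rw [hxs]; simp [hLnil]
    have hyne : ys ≠ [] := by
      rw [hys]; simp [hLnil]
    obtain ⟨wx, hwx⟩ := List.exists_mem_of_ne_nil xs hxne
    obtain ⟨wy, hwy⟩ := List.exists_mem_of_ne_nil ys hyne
    rw [pv_min?_eq ys _ H hrows hylt hyne, pv_max?_eq ys _ hrows hyne,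
        pv_min?_eq xs _ W hcols hxlt hxne, pv_max?_eq xs _ hcols hxne]
    have hguard : xs.foldl min W ≤ xs.foldl max 0 ∧ ys.foldl min H ≤ ys.foldl max 0 := by
      constructor
      · exact le_trans (pv_foldl_min_le xs W wx (List.mem_cons_of_mem _ hwx))
          (pv_foldl_max_ge xs 0 wx (List.mem_cons_of_mem _ hwx))
      · exact le_trans (pv_foldl_min_le ys H wy (List.mem_cons_of_mem _ hwy))
          (pv_foldl_max_ge ys 0 wy (List.mem_cons_of_mem _ hwy))
    rw [if_pos hguard]
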